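-- pv_equiv track=rewrite | github.com/bdw2292/molecular-cluster-enumeration | clustergenerator.py | CountAndRenumberClasses
-- ===== SOURCE A (Python) =====
-- def CountAndRenumberClasses(symmetry_classes):
--     """
--     Intent: Counts the number of symmetry classes and renumbers them to 1, 2, 3, ...
--     Input:
--         symmetry_classes: Array of symmetry classes
--     Output:
--         count: # of symmetry classes
--         symmetry_classes array is updated
--     Referenced By: ExtendInvariants
--     Description: -
--     """
--     count = 1
--     symmetry_classes = sorted(symmetry_classes, key=lambda sym: sym[1])
--     if(len(symmetry_classes) > 0):
--         idatom = symmetry_classes[0][1]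
--         symmetry_classes[0][1] = 1
--         for i in range(1,len(symmetry_classes)):
--             if(symmetry_classes[i][1] != idatom):
--                 idatom = symmetry_classes[i][1]
--                 count = count + 1
--                 symmetry_classes[i][1] = count
--             else:
--                 symmetry_classes[i][1] = count
--     return count
-- ===== SOURCE B (Python) =====
-- def CountAndRenumberClasses(symmetry_classes):
--     # Return value only differs in mechanism from A: rank distinct class ids once,
--     # then renumber in a single pass (same in-place mutation of the inner lists as A).
--     distinct = sorted(set(sym[1] for sym in symmetry_classes))
--     rankmap = {v: i + 1 for i, v in enumerate(distinct)}
--     for sym in symmetry_classes: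
--         sym[1] = rankmap[sym[1]]
--     return len(distinct) or 1
-- ===== Notes on version B (the rewrite author's own statement) =====
-- stated objective: simpler
-- what changed: Replaces the sort-then-adjacent-compare pass with a running counter by a sorted set of the distinct class ids and a rank dictionary used in one renumbering pass; the count is just the number of distinct ids (or 1 on empty input).
import Mathlib
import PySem

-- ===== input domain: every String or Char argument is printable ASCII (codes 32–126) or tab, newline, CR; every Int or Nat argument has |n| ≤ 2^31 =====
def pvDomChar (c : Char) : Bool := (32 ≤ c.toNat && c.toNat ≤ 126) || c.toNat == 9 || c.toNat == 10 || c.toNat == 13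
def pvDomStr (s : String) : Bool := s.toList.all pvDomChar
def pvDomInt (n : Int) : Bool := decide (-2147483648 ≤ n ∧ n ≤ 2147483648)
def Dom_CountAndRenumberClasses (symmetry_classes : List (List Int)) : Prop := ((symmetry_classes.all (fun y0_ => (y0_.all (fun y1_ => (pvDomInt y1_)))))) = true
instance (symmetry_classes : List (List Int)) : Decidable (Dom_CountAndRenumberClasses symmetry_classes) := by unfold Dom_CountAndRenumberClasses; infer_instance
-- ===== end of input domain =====

-- B counts the distinct class ids directly (sorted set + rank map) instead of A's
-- adjacent-compare pass with a running counter; equivalence is about the RETURN value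
-- (both Pythons perform the same in-place renumbering of the inner lists).

-- ===== PORT A =====
def CountAndRenumberClasses (symmetry_classes : List (List Int)) : Int :=
  let count : Int := 1
  let s := PySem.List.sorted symmetry_classes (fun sym => PySem.List.pyGetD sym 1 0) false
  if 0 < s.length then
    let idatom := PySem.List.pyGetD (PySem.List.pyGetD s 0 []) 1 0
    ((PySem.List.pyRange 1 (s.length : Int) 1).foldl
      (fun (st : Int × Int) i =>
        let v := PySem.List.pyGetD (PySem.List.pyGetD s i []) 1 0
        if v ≠ st.1 then (v, st.2 + 1) else st)
      (idatom, count)).2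
  else count

-- ===== PORT B =====
-- (the rank map and the renumbering loop only mutate the inner lists; the returned
--  value is len(distinct) or 1, which is what is ported)
def CountAndRenumberClasses_alt (symmetry_classes : List (List Int)) : Int :=
  let distinct := PySem.List.sorted
      (PySem.Set.ofList (symmetry_classes.map (fun sym => PySem.List.pyGetD sym 1 0)))
      (fun v => v) false
  let n : Int := distinct.length
  if n = 0 then 1 else n

-- ===== PRECONDITION & SPEC =====
-- Pre_ excludes exactly the inputs where the Python A raises IndexError (an inner
-- list shorter than 2, so sym[1] does not exist); B raises there too.
def Pre_CountAndRenumberClasses (symmetry_classes : List (List Int)) : Prop :=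
  ∀ sym ∈ symmetry_classes, 2 ≤ sym.length
instance (symmetry_classes : List (List Int)) : Decidable (Pre_CountAndRenumberClasses symmetry_classes) := by unfold Pre_CountAndRenumberClasses; infer_instance
def pvWitness_CountAndRenumberClasses : List (List Int) := [[5, 2], [7, 2, 9], [1, 4]]
def Spec_CountAndRenumberClasses (symmetry_classes : List (List Int)) (out : Int) : Prop := out = CountAndRenumberClasses_alt symmetry_classes
instance (symmetry_classes : List (List Int)) (out : Int) : Decidable (Spec_CountAndRenumberClasses symmetry_classes out) := by unfold Spec_CountAndRenumberClasses; infer_instance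

-- ===== CLAIM (what is proved, stated in full; the proofs are below) =====
def Claim_equal_CountAndRenumberClasses : Prop := ∀ (symmetry_classes : List (List Int)), Dom_CountAndRenumberClasses symmetry_classes → Pre_CountAndRenumberClasses symmetry_classes → Spec_CountAndRenumberClasses symmetry_classes (CountAndRenumberClasses symmetry_classes)

-- ===== LEMMAS AND PROOFS =====

-- the key Python reads: sym[1] (total form; under Pre_ it is the real element)
def pvKey (sym : List Int) : Int := PySem.List.pyGetD sym 1 0

-- A's loop over a key-sorted tail: the counter ends at c + |{keys of l} \ {a}|
theorem pvAuxCount (l : List (List Int)) (a c : Int)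
    (hchain : l.Pairwise (fun p q => pvKey p ≤ pvKey q))
    (hlb : ∀ x ∈ l, a ≤ pvKey x) :
    (l.foldl (fun (st : Int × Int) x =>
        if pvKey x ≠ st.1 then (pvKey x, st.2 + 1) else st) (a, c)).2
      = c + (((l.map pvKey).toFinset.erase a).card : Int) := by
  induction l generalizing a c with
  | nil => simp
  | cons x t ih =>
    rcases List.pairwise_cons.mp hchain with ⟨hx, ht⟩
    by_cases hv : pvKey x = a
    · simp only [List.foldl_cons, hv, ne_eq, not_true_eq_false, if_false]
      rw [ih a c ht (fun y hy => hv ▸ hx y hy), List.map_cons, List.toFinset_cons, hv,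
        Finset.erase_insert_eq_erase]
    · have hlt : a < pvKey x := lt_of_le_of_ne (hlb x (List.mem_cons_self)) (Ne.symm hv)
      simp only [List.foldl_cons, ne_eq, hv, not_false_eq_true, if_true]
      rw [ih (pvKey x) (c + 1) ht hx]
      have hnotmem : a ∉ insert (pvKey x) (t.map pvKey).toFinset := by
        simp only [Finset.mem_insert, List.mem_toFinset, List.mem_map, not_or]
        refine ⟨fun h => absurd h.symm hv, ?_⟩
        rintro ⟨y, hy, rfl⟩
        exact absurd (le_trans (hx y hy) le_rfl) (not_le.mpr hlt)
      have hcard : ((t.map pvKey).toFinset.erase (pvKey x)).card + 1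
          = (insert (pvKey x) (t.map pvKey).toFinset).card := by
        by_cases hmem : pvKey x ∈ (t.map pvKey).toFinset
        · rw [Finset.insert_eq_self.mpr hmem, Finset.card_erase_add_one hmem]
        · rw [Finset.erase_eq_self.mpr hmem, Finset.card_insert_of_notMem hmem]
      simp only [List.map_cons, List.toFinset_cons, Finset.erase_eq_of_notMem hnotmem]
      omega

theorem CountAndRenumberClasses_eq_card (xs : List (List Int)) :
    CountAndRenumberClasses xs
      = if xs = [] then 1 else (((xs.map pvKey).toFinset.card : Int)) := by
  unfold CountAndRenumberClasses
  set s := PySem.List.sorted xs (fun sym => PySem.List.pyGetD sym 1 0) false with hs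
  have hperm : s.Perm xs := PySem.List.sorted_perm ..
  by_cases hnil : xs = []
  · subst hnil
    simp [hs, PySem.List.sorted]
  · have hslen : s ≠ [] := by
      intro h; rw [h] at hperm; exact hnil hperm.symm.eq_nil
    obtain ⟨m, t, hmt⟩ := List.exists_cons_of_ne_nil hslen
    have hpair : s.Pairwise (fun p q => pvKey p ≤ pvKey q) := by
      have := PySem.List.sorted_pairwise xs (fun sym => PySem.List.pyGetD sym 1 0)
      simpa [pvKey, hs] using this
    simp only [hnil, if_false]
    have hlen : 0 < s.length := by simp [hmt]
    simp only [hlen, if_true]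
    have hbody : (fun (st : Int × Int) i =>
        if PySem.List.pyGetD (PySem.List.pyGetD s i []) 1 0 ≠ st.1 then
          (PySem.List.pyGetD (PySem.List.pyGetD s i []) 1 0, st.2 + 1) else st)
      = (fun (st : Int × Int) j =>
          (fun (st : Int × Int) x => if pvKey x ≠ st.1 then (pvKey x, st.2 + 1) else st)
            st (PySem.List.pyGetD s j [])) := rfl
    rw [hbody, PySem.List.foldl_pyRange_pyGetD' s ([] : List Int)
      (fun (st : Int × Int) x => if pvKey x ≠ st.1 then (pvKey x, st.2 + 1) else st)
      _ (by norm_num : (0:Int) ≤ 1)]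
    have hdrop : s.drop (1 : Int).toNat = t := by simp [hmt]
    have hget0 : PySem.List.pyGetD s 0 [] = m := by simp [hmt, PySem.List.pyGetD_ofNat']
    rw [hdrop, hget0]
    rcases List.pairwise_cons.mp (hmt ▸ hpair) with ⟨hm, ht⟩
    rw [show PySem.List.pyGetD m 1 0 = pvKey m from rfl, pvAuxCount t (pvKey m) 1 ht hm]
    have hsf : (s.map pvKey).toFinset = (xs.map pvKey).toFinset :=
      List.toFinset_eq_of_perm _ _ (List.Perm.map pvKey hperm)
    have hins : (xs.map pvKey).toFinset = insert (pvKey m) (t.map pvKey).toFinset := by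
      rw [← hsf, hmt]; simp
    rw [hins]
    have hcard : ((t.map pvKey).toFinset.erase (pvKey m)).card + 1
        = (insert (pvKey m) (t.map pvKey).toFinset).card := by
      by_cases hmem : pvKey m ∈ (t.map pvKey).toFinset
      · rw [Finset.insert_eq_self.mpr hmem, Finset.card_erase_add_one hmem]
      · rw [Finset.erase_eq_self.mpr hmem, Finset.card_insert_of_notMem hmem]
    omega

theorem CountAndRenumberClasses_alt_eq_card (xs : List (List Int)) :
    CountAndRenumberClasses_alt xs
      = if xs = [] then 1 else (((xs.map pvKey).toFinset.card : Int)) := by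
  unfold CountAndRenumberClasses_alt
  have hlen : (PySem.List.sorted
      (PySem.Set.ofList (xs.map (fun sym => PySem.List.pyGetD sym 1 0)))
      (fun v => v) false).length
      = (PySem.Set.ofList (xs.map pvKey)).length := by
    rw [PySem.List.length_sorted]; rfl
  have hcard : (PySem.Set.ofList (xs.map pvKey)).length = (xs.map pvKey).toFinset.card := by
    have hnd := PySem.Set.nodup_ofList (xs := xs.map pvKey)
    rw [← List.toFinset_card_of_nodup hnd]
    congr 1
    ext y
    simp [PySem.Set.mem_ofList]
  by_cases hnil : xs = []
  · subst hnil
    simp [PySem.Set.ofList, PySem.List.sorted]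
  · have hpos : 0 < (xs.map pvKey).toFinset.card := by
      obtain ⟨x, t, rfl⟩ := List.exists_cons_of_ne_nil hnil
      apply Finset.card_pos.mpr
      exact ⟨pvKey x, by simp⟩
    have hne : ((xs.map pvKey).toFinset.card : Int) ≠ 0 := by
      exact_mod_cast Nat.pos_iff_ne_zero.mp hpos
    simp only [hlen, hcard, hnil, if_false, hne, if_false]

-- ===== VERDICT (by name: the statement is the Claim_ definition above) =====
theorem CountAndRenumberClasses_spec : Claim_equal_CountAndRenumberClasses := by
  intro xs _ _
  unfold Spec_CountAndRenumberClasses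
  rw [CountAndRenumberClasses_eq_card, CountAndRenumberClasses_alt_eq_card]
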